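-- pv_equiv track=rewrite | github.com/MoonSuhyeon/re-bootcamp_quest2 | rag_versions/rag_app_v22.py | reorder_lost_in_middle
-- ===== SOURCE A (Python) =====
-- def reorder_lost_in_middle(chunks: list, scores: list) -> list:
--     if len(chunks) <= 2:
--         return chunks
--     paired  = sorted(zip(scores or [0]*len(chunks), chunks),
--                      key=lambda x: x[0] or 0, reverse=True)
--     result  = [None] * len(paired)
--     left, right = 0, len(paired) - 1
--     for i, (_, chunk) in enumerate(paired):
--         if i % 2 == 0:
--             result[left]  = chunk
--             left  += 1
--         else:
--             result[right] = chunk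
--             right -= 1
--     return [c for c in result if c is not None]
-- ===== SOURCE B (Python) =====
-- def reorder_lost_in_middle(chunks: list, scores: list) -> list:
--     if len(chunks) <= 2:
--         return chunks
--     paired = sorted(zip(scores or [0] * len(chunks), chunks),
--                     key=lambda x: x[0] or 0, reverse=True)
--     n = len(paired)
--     # closed-form permutation: output slot j is fed by sorted rank 2*j while that
--     # is a valid rank (first half), and by sorted rank 2*(n-1-j)+1 afterwards
--     return [paired[2 * j if 2 * j < n else 2 * (n - 1 - j) + 1][1] for j in range(n)]
-- ===== Notes on version B (the rewrite author's own statement) =====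
-- stated objective: simpler
-- what changed: Replaces A's mutable placement pass (None-prefilled array, left/right write pointers, parity branch, trailing None-filter) with a closed-form permutation: one comprehension reads sorted rank 2*j for the first half of output slots and rank 2*(n-1-j)+1 for the rest.
import Mathlib
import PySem

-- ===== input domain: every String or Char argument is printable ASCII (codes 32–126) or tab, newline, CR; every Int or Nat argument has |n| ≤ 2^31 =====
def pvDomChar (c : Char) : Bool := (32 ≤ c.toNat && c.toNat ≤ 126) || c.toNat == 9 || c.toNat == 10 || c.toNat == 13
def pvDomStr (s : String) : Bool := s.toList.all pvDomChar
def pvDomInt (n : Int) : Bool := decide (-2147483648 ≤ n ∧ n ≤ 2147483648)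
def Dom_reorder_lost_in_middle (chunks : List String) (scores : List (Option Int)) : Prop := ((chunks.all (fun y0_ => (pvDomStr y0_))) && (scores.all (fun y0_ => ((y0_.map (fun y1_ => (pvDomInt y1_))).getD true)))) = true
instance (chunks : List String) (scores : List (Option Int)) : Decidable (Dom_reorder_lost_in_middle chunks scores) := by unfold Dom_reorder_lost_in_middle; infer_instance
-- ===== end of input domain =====

-- B replaces A's mutable placement pass (None-prefilled array, two write pointers, None-filter)
-- by a closed-form permutation: output slot j reads sorted rank 2*j, else rank 2*(n-1-j)+1 (simpler).


-- ===== PORT A =====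
def reorder_lost_in_middle (chunks : List String) (scores : List (Option Int)) : List String :=
  if chunks.length ≤ 2 then chunks
  else
    -- 'scores or [0]*len(chunks)': Python's falsy list is the empty one; the 0 entries
    -- only feed the key 'x[0] or 0', so they are 'some 0' here (the key maps both to 0).
    let scores' := if scores.isEmpty then List.replicate chunks.length (some (0 : Int)) else scores
    let paired := PySem.List.sorted (scores'.zip chunks) (fun x => x.1.getD 0) true
    let st := (PySem.List.enumerate paired).foldl
      (fun (st : List (Option String) × Nat × Nat) ic =>
        if ic.1 % 2 == 0 then (st.1.set st.2.1 (some ic.2.2), st.2.1 + 1, st.2.2)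
        else (st.1.set st.2.2 (some ic.2.2), st.2.1, st.2.2 - 1))
      (List.replicate paired.length none, 0, paired.length - 1)
    st.1.filterMap id

-- ===== PORT B =====
def reorder_lost_in_middle_alt (chunks : List String) (scores : List (Option Int)) : List String :=
  if chunks.length ≤ 2 then chunks
  else
    let scores' := if scores.isEmpty then List.replicate chunks.length (some (0 : Int)) else scores
    let paired := PySem.List.sorted (scores'.zip chunks) (fun x => x.1.getD 0) true
    let n : Int := paired.length
    -- 'paired[...][1] for j in range(n)': the index is always in range, pyGetD's default is never read
    (PySem.List.pyRange 0 n 1).map (fun j =>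
      (PySem.List.pyGetD paired (if 2 * j < n then 2 * j else 2 * (n - 1 - j) + 1) (none, "")).2)

-- ===== PRECONDITION & SPEC =====
def Spec_reorder_lost_in_middle (chunks : List String) (scores : List (Option Int)) (out : List String) : Prop := out = reorder_lost_in_middle_alt chunks scores
instance (chunks : List String) (scores : List (Option Int)) (out : List String) : Decidable (Spec_reorder_lost_in_middle chunks scores out) := by unfold Spec_reorder_lost_in_middle; infer_instance

-- ===== CLAIM (what is proved, stated in full; the proofs are below) =====
def Claim_equal_reorder_lost_in_middle : Prop := ∀ (chunks : List String) (scores : List (Option Int)), Dom_reorder_lost_in_middle chunks scores → Spec_reorder_lost_in_middle chunks scores (reorder_lost_in_middle chunks scores)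

-- ===== LEMMAS AND PROOFS =====

/-- Elements at even positions. -/
def pvE {α : Type} : List α → List α
  | [] => []
  | [a] => [a]
  | a :: _ :: t => a :: pvE t

/-- Elements at odd positions. -/
def pvO {α : Type} : List α → List α
  | [] => []
  | [_] => []
  | _ :: b :: t => b :: pvO t

/-- Split a pair list by parity of a running index, keeping the second components. -/
def pvParts (s : Int) : List (Option Int × String) → List String × List String
  | [] => ([], [])
  | p :: l =>
    let r := pvParts (s + 1) l
    if s % 2 == 0 then (p.2 :: r.1, r.2) else (r.1, p.2 :: r.2)

lemma pv_set_at_len {α : Type} (xs zs : List α) (y v : α) :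
    (xs ++ y :: zs).set xs.length v = xs ++ v :: zs := by
  induction xs with
  | nil => simp
  | cons a t ih => simp [ih]

lemma pvParts_congr (l : List (Option Int × String)) : ∀ (s t : Int), s % 2 = t % 2 →
    pvParts s l = pvParts t l := by
  induction l with
  | nil => intro s t _; rfl
  | cons p r ih =>
    intro s t h
    simp only [pvParts, ih (s + 1) (t + 1) (by omega)]
    have : (s % 2 == 0) = (t % 2 == 0) := by
      by_cases hs : s % 2 = 0 <;> simp [hs] <;> omega
    rw [this]

lemma pvParts_eq (l : List (Option Int × String)) :
    pvParts 0 l = ((pvE l).map Prod.snd, (pvO l).map Prod.snd) := by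
  induction l using pvE.induct with
  | case1 => rfl
  | case2 p => rfl
  | case3 p q t ih =>
    have h2 : pvParts 2 t = pvParts 0 t := pvParts_congr t 2 0 (by omega)
    simp only [pvParts, pvE, pvO, List.map_cons]
    norm_num
    rw [h2, ih]
    exact ⟨rfl, rfl⟩

lemma pvE_getD {α : Type} (d : α) (l : List α) :
    (List.range ((l.length + 1) / 2)).map (fun k => l.getD (2 * k) d) = pvE l := by
  induction l using pvE.induct with
  | case1 => simp [pvE]
  | case2 a => simp [pvE, List.getD]
  | case3 a b t ih =>
    have hlen : ((a :: b :: t).length + 1) / 2 = (t.length + 1) / 2 + 1 := by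
      simp only [List.length_cons]; omega
    rw [hlen, List.range_succ_eq_map, List.map_cons, List.map_map]
    refine congrArg₂ _ (by simp [List.getD]) ?_
    rw [← ih]
    refine List.map_congr_left (fun k _ => ?_)
    simp only [Function.comp_apply]
    show (a :: b :: t).getD (2 * Nat.succ k) d = t.getD (2 * k) d
    have h1 : 2 * Nat.succ k = 2 * k + 1 + 1 := by omega
    rw [h1, List.getD_cons_succ, List.getD_cons_succ]

lemma pvO_getD {α : Type} (d : α) (l : List α) :
    (List.range (l.length / 2)).map (fun k => l.getD (2 * k + 1) d) = pvO l := by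
  induction l using pvO.induct with
  | case1 => simp [pvO]
  | case2 a => simp [pvO]
  | case3 a b t ih =>
    have hlen : (a :: b :: t).length / 2 = t.length / 2 + 1 := by
      simp only [List.length_cons]; omega
    rw [hlen, List.range_succ_eq_map, List.map_cons, List.map_map]
    refine congrArg₂ _ (by simp [List.getD]) ?_
    rw [← ih]
    refine List.map_congr_left (fun k _ => ?_)
    simp only [Function.comp_apply]
    show (a :: b :: t).getD (2 * Nat.succ k + 1) d = t.getD (2 * k + 1) d
    have h1 : 2 * Nat.succ k + 1 = 2 * k + 1 + 1 + 1 := by omega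
    rw [h1, List.getD_cons_succ, List.getD_cons_succ]

lemma pv_range_rev {α : Type} (m : ℕ) (f : ℕ → α) :
    (List.range m).map (fun k => f (m - 1 - k)) = ((List.range m).map f).reverse := by
  rw [← List.map_reverse, List.range_eq_range', List.reverse_range', List.map_map,
    ← List.range_eq_range']
  simp [Function.comp_def]

lemma pv_perm_getD {α : Type} (d : α) (l : List α) :
    (List.range l.length).map
      (fun k => l.getD (if 2 * k < l.length then 2 * k else 2 * (l.length - 1 - k) + 1) d)
    = pvE l ++ (pvO l).reverse := by
  have hsplit : List.range l.length
      = List.range ((l.length + 1) / 2)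
        ++ (List.range (l.length / 2)).map (fun k => (l.length + 1) / 2 + k) := by
    have h : l.length = (l.length + 1) / 2 + l.length / 2 := by omega
    conv_lhs => rw [h, List.range_add]
  rw [hsplit, List.map_append, List.map_map]
  refine congrArg₂ _ ?_ ?_
  · rw [← pvE_getD d l]
    refine List.map_congr_left (fun k hk => ?_)
    have hk' := List.mem_range.mp hk
    have : 2 * k < l.length := by omega
    simp [this]
  · rw [← pvO_getD d l, ← pv_range_rev]
    refine List.map_congr_left (fun k hk => ?_)
    have hk' := List.mem_range.mp hk
    have h1 : ¬ 2 * ((l.length + 1) / 2 + k) < l.length := by omega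
    have h2 : l.length - 1 - ((l.length + 1) / 2 + k) = 2 * (l.length / 2 - 1 - k) + 1 - 1 - (l.length / 2 - 1 - k) := by omega
    simp only [Function.comp_apply, if_neg h1]
    have h3 : 2 * (l.length - 1 - ((l.length + 1) / 2 + k)) + 1 = 2 * (l.length / 2 - 1 - k) + 1 := by omega
    rw [h3]

lemma pvE_map {α β : Type} (f : α → β) (l : List α) : pvE (l.map f) = (pvE l).map f := by
  induction l using pvE.induct with
  | case1 => rfl
  | case2 a => rfl
  | case3 a b t ih => simp [pvE, ih]

lemma pvO_map {α β : Type} (f : α → β) (l : List α) : pvO (l.map f) = (pvO l).map f := by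
  induction l using pvO.induct with
  | case1 => rfl
  | case2 a => rfl
  | case3 a b t ih => simp [pvO, ih]

lemma pv_getD_snd (l : List (Option Int × String)) (i : ℕ) :
    (l.getD i ((none : Option Int), "")).2 = (l.map Prod.snd).getD i "" := by
  simp only [List.getD, List.getElem?_map]
  cases l[i]? <;> rfl

lemma pv_loopA (l : List (Option Int × String)) : ∀ (s : Int) (E O : List String),
    (PySem.List.enumerate l s).foldl
      (fun (st : List (Option String) × Nat × Nat) ic =>
        if ic.1 % 2 == 0 then (st.1.set st.2.1 (some ic.2.2), st.2.1 + 1, st.2.2)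
        else (st.1.set st.2.2 (some ic.2.2), st.2.1, st.2.2 - 1))
      (E.map some ++ List.replicate l.length none ++ O.map some,
       E.length, E.length + l.length - 1)
    = ((E ++ (pvParts s l).1).map some ++ ((pvParts s l).2.reverse ++ O).map some,
       E.length + (pvParts s l).1.length,
       (E.length + l.length - 1) - (pvParts s l).2.length) := by
  induction l with
  | nil => intro s E O; simp [pvParts, PySem.List.enumerate_nil]
  | cons p t ih =>
    intro s E O
    rw [PySem.List.enumerate_cons]
    simp only [List.foldl_cons, pvParts]
    by_cases h : s % 2 == 0
    · -- even index: write at left = E.length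
      have hset : (E.map some ++ List.replicate (p :: t).length (none : Option String) ++ O.map some).set
          E.length (some p.2)
          = (E ++ [p.2]).map some ++ List.replicate t.length none ++ O.map some := by
        have hs : (E.map some ++ List.replicate (p :: t).length (none : Option String) ++ O.map some)
            = E.map some ++ (none :: (List.replicate t.length none ++ O.map some)) := by
          simp [List.replicate_succ]
        rw [hs]
        have h3 := pv_set_at_len (E.map some) (List.replicate t.length (none : Option String) ++ O.map some)
          none (some p.2)
        simp only [List.length_map] at h3
        rw [h3]; simp
      simp only [h, ite_true]
      rw [hset]
      have h1 : E.length + 1 = (E ++ [p.2]).length := by simp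
      have h2 : E.length + (p :: t).length - 1 = (E ++ [p.2]).length + t.length - 1 := by
        simp <;> omega
      rw [h1, h2, ih (s + 1) (E ++ [p.2]) O]
      simp only [Prod.mk.injEq]
      refine ⟨by simp, by simp <;> omega, by simp <;> omega⟩
    · -- odd index: write at right = E.length + (t.length + 1) - 1
      have hsplit : (E.map some ++ List.replicate (p :: t).length (none : Option String) ++ O.map some)
          = (E.map some ++ List.replicate t.length none) ++ (none :: O.map some) := by
        simp [List.replicate_succ']
      have hpos : E.length + (p :: t).length - 1 = (E.map some ++ List.replicate t.length (none : Option String)).length := by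
        simp <;> omega
      have hset : (E.map some ++ List.replicate (p :: t).length (none : Option String) ++ O.map some).set
          (E.length + (p :: t).length - 1) (some p.2)
          = E.map some ++ List.replicate t.length none ++ (p.2 :: O).map some := by
        rw [hsplit, hpos, pv_set_at_len]
        simp
      simp only [if_neg h]
      rw [hset]
      have h2 : E.length + (p :: t).length - 1 - 1 = E.length + t.length - 1 := by
        simp <;> omega
      rw [h2, ih (s + 1) E (p.2 :: O)]
      simp only [Prod.mk.injEq]
      refine ⟨by simp, by simp, by simp <;> omega⟩

/-- B's pyRange/pyGetD comprehension over a pair list computes evens-then-reversed-odds. -/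
lemma pv_altform (l : List (Option Int × String)) :
    (PySem.List.pyRange 0 (l.length : Int) 1).map (fun j =>
      (PySem.List.pyGetD l
        (if 2 * j < (l.length : Int) then 2 * j else 2 * ((l.length : Int) - 1 - j) + 1)
        ((none : Option Int), "")).2)
    = (pvE l).map Prod.snd ++ ((pvO l).map Prod.snd).reverse := by
  rw [PySem.List.pyRange_one]
  simp only [Int.sub_zero, Int.toNat_natCast, List.map_map]
  have hmain := pv_perm_getD ("" : String) (l.map Prod.snd)
  simp only [List.length_map] at hmain
  rw [← pvE_map, ← pvO_map, ← hmain]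
  refine List.map_congr_left (fun k hk => ?_)
  have hk' := List.mem_range.mp hk
  simp only [Function.comp_apply, Int.zero_add]
  by_cases hc : 2 * k < l.length
  · have hci : 2 * (k : Int) < (l.length : Int) := by omega
    rw [if_pos hci, if_pos hc]
    have : (2 : Int) * (k : Int) = ((2 * k : ℕ) : Int) := by push_cast; ring
    rw [this, PySem.List.pyGetD_natCast, pv_getD_snd]
  · have hci : ¬ 2 * (k : Int) < (l.length : Int) := by omega
    rw [if_neg hci, if_neg hc]
    have : 2 * ((l.length : Int) - 1 - (k : Int)) + 1 = ((2 * (l.length - 1 - k) + 1 : ℕ) : Int) := by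
      omega
    rw [this, PySem.List.pyGetD_natCast, pv_getD_snd]

-- ===== VERDICT (by name: the statement is the Claim_ definition above) =====
theorem reorder_lost_in_middle_spec : Claim_equal_reorder_lost_in_middle := by
  intro chunks scores _
  unfold Spec_reorder_lost_in_middle reorder_lost_in_middle reorder_lost_in_middle_alt
  by_cases hlen : chunks.length ≤ 2
  · simp [hlen]
  · simp only [if_neg hlen]
    set paired := PySem.List.sorted
      ((if scores.isEmpty then List.replicate chunks.length (some (0 : Int)) else scores).zip chunks)
      (fun x => x.1.getD 0) true with hp
    have hA := pv_loopA paired 0 [] []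
    simp only [List.map_nil, List.nil_append, List.append_nil, List.length_nil,
      Nat.zero_add] at hA
    rw [hA, pv_altform, pvParts_eq]
    simp [List.filterMap_append]
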